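-- pv_equiv track=rewrite | github.com/scaife-viewer/atlas-data-prep | crito-shamsian/new-approach-jtauber.py | skip_substring
-- ===== SOURCE A (Python) =====
-- def skip_substring(A: list[str], B: list[str], tokens_to_ignore: set[int] | None=None):
--     if tokens_to_ignore is None:
--         tokens_to_ignore = set()
--     found = False
--
--     matches: list[int] | None = []
--     for i in range(1, len(B) + 1):
--         found = False
--         if matches:
--             start = matches[-1]
--         else:
--             start = 1
--         for j in range(start, len(A) + 1):
--             if j in tokens_to_ignore:
--                 continue
--             if A[j - 1] == B[i - 1]:
--                 matches.append(j)
--                 found = True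
--                 break
--         if found:
--             continue
--         else:
--             matches = None
--             break
--
--     return matches
-- ===== SOURCE B (Python) =====
-- def skip_substring(A: list[str], B: list[str], tokens_to_ignore: set[int] | None = None):
--     ignore = tokens_to_ignore if tokens_to_ignore is not None else set()
--     # index: token -> ascending list of its (non-ignored, 1-based) positions in A
--     pairs = [(tok, pos) for pos, tok in enumerate(A, 1) if pos not in ignore]
--     index: dict[str, list[int]] = {}
--     for tok, pos in pairs:
--         index.setdefault(tok, []).append(pos)
--     out: list[int] = []
--     start = 1
--     for tok in B:
--         ps = index.get(tok, [])
--         # hand-rolled bisect_left(ps, start): first index with ps[lo] >= start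
--         lo, hi = 0, len(ps)
--         while lo < hi:
--             mid = (lo + hi) // 2
--             if ps[mid] < start:
--                 lo = mid + 1
--             else:
--                 hi = mid
--         if lo == len(ps):
--             return None
--         start = ps[lo]
--         out.append(start)
--     return out
-- ===== Notes on version B (the rewrite author's own statement) =====
-- stated objective: alternative
-- what changed: Instead of A's stateful rescan of A from the last matched position for every element of B, B builds a token->sorted-positions index of A once (skipping ignored positions) and answers each B element independently with a binary search for the first position >= start.
import Mathlib
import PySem

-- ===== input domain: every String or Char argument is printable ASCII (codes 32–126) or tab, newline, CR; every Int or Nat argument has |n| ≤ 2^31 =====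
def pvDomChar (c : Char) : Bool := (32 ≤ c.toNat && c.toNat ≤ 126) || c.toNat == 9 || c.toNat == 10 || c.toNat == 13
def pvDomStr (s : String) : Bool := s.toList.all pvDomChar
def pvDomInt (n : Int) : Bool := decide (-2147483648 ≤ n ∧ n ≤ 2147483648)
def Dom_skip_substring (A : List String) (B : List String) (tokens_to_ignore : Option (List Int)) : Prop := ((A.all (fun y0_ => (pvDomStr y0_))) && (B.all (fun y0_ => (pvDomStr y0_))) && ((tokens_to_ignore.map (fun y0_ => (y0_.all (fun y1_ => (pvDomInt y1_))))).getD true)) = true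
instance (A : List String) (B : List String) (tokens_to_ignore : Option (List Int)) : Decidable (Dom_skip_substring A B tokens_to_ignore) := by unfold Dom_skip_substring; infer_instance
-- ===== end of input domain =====

-- B replaces A's cumulative left-to-right rescan of A by a token→sorted-positions index built once
-- plus a binary search per element of B (objective: alternative algorithm, same cost).

-- ===== PORT A =====
-- inner 'for j in range(start, len(A)+1)' loop: first non-ignored j with A[j-1] == b, else None
def ssFind (ign : PySem.Set Int) (A : List String) (b : String) (start : Int) : Option Int :=
  (PySem.List.pyRange start ((A.length : Int) + 1) 1).find?
    (fun j => !(PySem.Set.contains ign j) && (PySem.List.pyGet? A (j - 1) == some b))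

-- outer 'for i in range(1, len(B)+1)' loop; 'matches = None; break' is the none branch
def ssLoop (ign : PySem.Set Int) (A : List String) : List String → List Int → Option (List Int)
  | [], ms => some ms
  | b :: rest, ms =>
      let start : Int := (ms.getLast?).getD 1
      match ssFind ign A b start with
      | some j => ssLoop ign A rest (ms ++ [j])
      | none => none

def skip_substring (A : List String) (B : List String) (tokens_to_ignore : Option (List Int)) : Option (List Int) :=
  ssLoop (PySem.Set.ofList (tokens_to_ignore.getD [])) A B []

-- ===== PORT B =====
-- token -> ascending list of its non-ignored 1-based positions in A
def altIndex (ign : PySem.Set Int) (A : List String) : PySem.Dict String (List Int) :=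
  (((PySem.List.enumerate A 1).filter (fun p => !(PySem.Set.contains ign p.1))).map
      (fun p => (p.2, p.1))).foldl
    (fun d p => d.modify p.1 [] (fun l => l ++ [p.2])) PySem.Dict.empty

-- 'for tok in B' loop; the hand-rolled lo/hi loop in Source B is exactly bisect_left = PySem.List.bisectLeft
def altLoop (idx : PySem.Dict String (List Int)) : List String → Int → List Int → Option (List Int)
  | [], _, out => some out
  | tok :: rest, start, out =>
      let ps := idx.getD tok []
      let lo := PySem.List.bisectLeft ps start
      if lo = ps.length then none
      else
        let v := ps.getD lo 0
        altLoop idx rest v (out ++ [v])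

def skip_substring_alt (A : List String) (B : List String) (tokens_to_ignore : Option (List Int)) : Option (List Int) :=
  let ign := PySem.Set.ofList (tokens_to_ignore.getD [])
  altLoop (altIndex ign A) B 1 []

-- ===== PRECONDITION & SPEC =====
def Spec_skip_substring (A : List String) (B : List String) (tokens_to_ignore : Option (List Int)) (out : Option (List Int)) : Prop := out = skip_substring_alt A B tokens_to_ignore
instance (A : List String) (B : List String) (tokens_to_ignore : Option (List Int)) (out : Option (List Int)) : Decidable (Spec_skip_substring A B tokens_to_ignore out) := by unfold Spec_skip_substring; infer_instance

-- ===== CLAIM (what is proved, stated in full; the proofs are below) =====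
def Claim_equal_skip_substring : Prop := ∀ (A : List String) (B : List String) (tokens_to_ignore : Option (List Int)), Dom_skip_substring A B tokens_to_ignore → Spec_skip_substring A B tokens_to_ignore (skip_substring A B tokens_to_ignore)

-- ===== LEMMAS AND PROOFS =====

-- the predicate A's inner scan tests at position j
def ssP (ign : PySem.Set Int) (A : List String) (b : String) (j : Int) : Bool :=
  !(PySem.Set.contains ign j) && (PySem.List.pyGet? A (j - 1) == some b)

-- the ascending list of all positions of b in A (1-based, non-ignored)
def posL (ign : PySem.Set Int) (A : List String) (b : String) : List Int :=
  (PySem.List.pyRange 1 ((A.length : Int) + 1) 1).filter (ssP ign A b)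

lemma pyGet?_cons_of_pos {α : Type} (x : α) (xs : List α) (i : Int) (h : 1 ≤ i) :
    PySem.List.pyGet? (x :: xs) i = PySem.List.pyGet? xs (i - 1) := by
  obtain ⟨k, hk⟩ : ∃ k : Nat, i = (k : Int) + 1 := ⟨(i - 1).toNat, by omega⟩
  subst hk
  have h1 : ((k : Int) + 1) = ((k + 1 : Nat) : Int) := by push_cast; ring
  have h2 : ((k : Int) + 1 - 1) = (k : Int) := by ring
  rw [h2, h1, PySem.List.pyGet?_natCast, PySem.List.pyGet?_natCast]
  simp

lemma enumFilterMap (b : String) (r : Int → Bool) :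
    ∀ (A : List String) (s : Int),
    ((PySem.List.enumerate A s).filter (fun p => r p.1 && (p.2 == b))).map (fun p => p.1)
      = (PySem.List.pyRange s (s + (A.length : Int)) 1).filter
          (fun j => r j && (PySem.List.pyGet? A (j - s) == some b)) := by
  intro A
  induction A with
  | nil =>
      intro s
      simp [PySem.List.enumerate]
  | cons x xs ih =>
      intro s
      rw [PySem.List.enumerate_cons]
      have hlt : s < s + ((x :: xs).length : Int) := by
        simp only [List.length_cons]; omega
      rw [PySem.List.pyRange_one_cons hlt]
      have hhead : PySem.List.pyGet? (x :: xs) (s - s) = some x := by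
        have : s - s = ((0 : Nat) : Int) := by omega
        rw [this, PySem.List.pyGet?_natCast]; rfl
      have htail : (PySem.List.pyRange (s+1) (s + ((x :: xs).length : Int)) 1).filter
            (fun j => r j && (PySem.List.pyGet? (x :: xs) (j - s) == some b))
          = (PySem.List.pyRange (s+1) ((s+1) + (xs.length : Int)) 1).filter
            (fun j => r j && (PySem.List.pyGet? xs (j - (s+1)) == some b)) := by
        have harg : s + ((x :: xs).length : Int) = (s+1) + (xs.length : Int) := by
          simp; ring
        rw [harg]
        apply List.filter_congr
        intro j hj
        have hge : s + 1 ≤ j := (PySem.List.mem_pyRange_one.mp hj).1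
        rw [pyGet?_cons_of_pos x xs (j - s) (by omega)]
        have : j - s - 1 = j - (s + 1) := by ring
        rw [this]
      rw [List.filter_cons, List.filter_cons, htail, ← ih (s+1), hhead]
      by_cases hr : r s = true <;> by_cases hx : (x == b) = true <;>
        simp [hr, hx]

lemma idx_getD (ign : PySem.Set Int) (A : List String) (b : String) :
    (altIndex ign A).getD b [] = posL ign A b := by
  unfold altIndex posL
  rw [PySem.Dict.getD_foldl_modify_append]
  rw [List.filter_map, List.map_map]
  have h1 : (PySem.Dict.empty : PySem.Dict String (List Int)).getD b [] = [] := by rfl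
  rw [h1, List.nil_append, List.filter_filter]
  have h2 := enumFilterMap b (fun j => !(PySem.Set.contains ign j)) A 1
  have harg : (1 : Int) + (A.length : Int) = (A.length : Int) + 1 := by ring
  rw [harg] at h2
  unfold ssP
  have hswap : (List.filter (fun a => (a.2 == b) && !(PySem.Set.contains ign a.1))
        (PySem.List.enumerate A 1))
      = (List.filter (fun p => !(PySem.Set.contains ign p.1) && (p.2 == b))
        (PySem.List.enumerate A 1)) :=
    List.filter_congr (fun x _ => Bool.and_comm _ _)
  simp only [Function.comp_def] at h2 ⊢
  rw [hswap]
  exact h2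

lemma posL_pairwise (ign : PySem.Set Int) (A : List String) (b : String) :
    (posL ign A b).Pairwise (· ≤ ·) := by
  unfold posL
  exact ((PySem.List.pairwise_lt_pyRange_one 1 ((A.length : Int) + 1)).filter _).imp
    (fun h => le_of_lt h)

lemma mem_posL (ign : PySem.Set Int) (A : List String) (b : String) (j : Int)
    (h : j ∈ posL ign A b) : 1 ≤ j ∧ j < (A.length : Int) + 1 := by
  unfold posL at h
  exact PySem.List.mem_pyRange_one.mp (List.mem_of_mem_filter h)

-- A's scan from start = first element of the full position list that is ≥ start
lemma ssFind_eq (ign : PySem.Set Int) (A : List String) (b : String) (start : Int)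
    (h1 : 1 ≤ start) (h2 : start ≤ (A.length : Int) + 1) :
    ssFind ign A b start = (posL ign A b).find? (fun j => decide (start ≤ j)) := by
  unfold ssFind posL
  rw [PySem.List.pyRange_one_append 1 start ((A.length : Int) + 1) h1 h2]
  rw [List.filter_append, ← List.head?_filter, ← List.head?_filter, List.filter_append]
  have hnil : ((PySem.List.pyRange 1 start 1).filter (ssP ign A b)).filter
      (fun j => decide (start ≤ j)) = [] := by
    apply List.filter_eq_nil_iff.mpr
    intro j hj
    have := (PySem.List.mem_pyRange_one.mp (List.mem_of_mem_filter hj)).2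
    simp; omega
  have hself : ((PySem.List.pyRange start ((A.length : Int) + 1) 1).filter (ssP ign A b)).filter
      (fun j => decide (start ≤ j))
      = (PySem.List.pyRange start ((A.length : Int) + 1) 1).filter (ssP ign A b) := by
    apply List.filter_eq_self.mpr
    intro j hj
    have := (PySem.List.mem_pyRange_one.mp (List.mem_of_mem_filter hj)).1
    simp; omega
  rw [hnil, hself, List.nil_append]
  rfl

-- find? of a monotone threshold predicate = the element at the bisection index
lemma find?_eq_getElem? (Q : Int → Bool) :
    ∀ (ps : List Int) (lo : Nat),
    (∀ (j : Nat) (hj : j < ps.length), j < lo → Q ps[j] = false) →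
    (∀ (h : lo < ps.length), Q ps[lo] = true) →
    ps.find? Q = ps[lo]? := by
  intro ps
  induction ps with
  | nil => intro lo _ _; simp
  | cons x t ih =>
      intro lo hfalse htrue
      cases lo with
      | zero =>
          have := htrue (by simp)
          simp at this
          simp [this]
      | succ m =>
          have hx : Q x = false := hfalse 0 (by simp) (by omega)
          simp [hx]
          exact ih m (fun j hj hlt => hfalse (j+1) (by simpa using hj) (by omega))
            (fun h => htrue (by simpa using h))

lemma bisect_find (ps : List Int) (start : Int) (hs : ps.Pairwise (· ≤ ·)) :
    ps.find? (fun j => decide (start ≤ j)) = ps[PySem.List.bisectLeft ps start]? := by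
  obtain ⟨hle, hlt, hge⟩ := PySem.List.bisectLeft_spec ps start hs
  apply find?_eq_getElem?
  · intro j hj hjlt
    have := hlt j hj hjlt
    simp; omega
  · intro h
    have := hge _ h (le_refl _)
    simp; omega

-- the outer loops step in lockstep
lemma loop_eq (ign : PySem.Set Int) (A : List String) :
    ∀ (Bs : List String) (ms : List Int),
    1 ≤ (ms.getLast?).getD 1 → (ms.getLast?).getD 1 ≤ (A.length : Int) + 1 →
    ssLoop ign A Bs ms = altLoop (altIndex ign A) Bs ((ms.getLast?).getD 1) ms := by
  intro Bs
  induction Bs with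
  | nil => intro ms _ _; rfl
  | cons tok rest ih =>
      intro ms h1 h2
      set st : Int := (ms.getLast?).getD 1 with hst
      set ps : List Int := posL ign A tok with hps
      have hfind : ssFind ign A tok st = ps[PySem.List.bisectLeft ps st]? := by
        rw [ssFind_eq ign A tok st h1 h2, bisect_find ps st (posL_pairwise ign A tok)]
      have hidx : (altIndex ign A).getD tok [] = ps := idx_getD ign A tok
      obtain ⟨hle, _, _⟩ := PySem.List.bisectLeft_spec ps st (posL_pairwise ign A tok)
      simp only [ssLoop, altLoop]
      rw [hidx, hfind]
      by_cases hcase : PySem.List.bisectLeft ps st = ps.length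
      · rw [if_pos hcase, List.getElem?_eq_none (le_of_eq hcase.symm)]
      · rw [if_neg hcase]
        have hltlen : PySem.List.bisectLeft ps st < ps.length := lt_of_le_of_ne hle hcase
        rw [List.getElem?_eq_getElem hltlen]
        have hgetD : ps.getD (PySem.List.bisectLeft ps st) 0 = ps[PySem.List.bisectLeft ps st] :=
          List.getD_eq_getElem ps 0 hltlen
        rw [hgetD]
        set v := ps[PySem.List.bisectLeft ps st] with hv
        have hvmem : v ∈ ps := List.getElem_mem hltlen
        obtain ⟨hv1, hv2⟩ := mem_posL ign A tok v (hps ▸ hvmem)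
        have hlast : ((ms ++ [v]).getLast?).getD 1 = v := by simp
        have hrec := ih (ms ++ [v]) (by rw [hlast]; omega) (by rw [hlast]; omega)
        rw [hlast] at hrec
        exact hrec

-- ===== VERDICT (by name: the statement is the Claim_ definition above) =====
theorem skip_substring_spec : Claim_equal_skip_substring := by
  intro A B tok _
  unfold Spec_skip_substring skip_substring skip_substring_alt
  have h0 : ((([] : List Int)).getLast?).getD 1 = (1 : Int) := rfl
  have h := loop_eq (PySem.Set.ofList (tok.getD [])) A B []
    (by rw [h0]) (by rw [h0]; omega)
  rw [h0] at h
  exact h
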